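-- pv_equiv track=rewrite | github.com/LanderDebreyne/cli-agent | utils/output_limiter.py | format_file_search_results
-- ===== SOURCE A (Python) =====
-- from typing import Any, Dict, List, Optional, Union
--
-- def format_file_search_results(results: List[Dict[str, Any]], query: str, max_chars: int = 5000) -> str:
--     """Format file search results with size limiting
--
--     Args:
--         results: List of file matches
--         query: The search query
--         max_chars: Maximum number of characters in the output
--
--     Returns:
--         Formatted results
--     """
--     if not results:
--         return f"No files found matching '{query}'"
--
--     content = f"Found {len(results)} files matching '{query}':\n\n"
--
--     for i, result in enumerate(results, 1):
--         line = f"{i}. {result['path']} (Score: {result['score']})\n"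
--
--         # Check if adding this line would exceed the limit
--         if len(content) + len(line) > max_chars:
--             remaining = len(results) - i + 1
--             content += f"\n[{remaining} more matches not shown due to output size limit]"
--             break
--
--         content += line
--
--     return content
-- ===== SOURCE B (Python) =====
-- def format_file_search_results(results, query, max_chars=5000):
--     """Format file search results with size limiting (cutoff via precomputed lines + running totals)."""
--     if not results:
--         return f"No files found matching '{query}'"
--
--     header = f"Found {len(results)} files matching '{query}':\n\n"
--     lines = [f"{i}. {r['path']} (Score: {r['score']})\n" for i, r in enumerate(results, 1)]
--
--     totals = []
--     running = 0
--     for l in lines: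
--         running += len(l)
--         totals.append(running)
--
--     cut = next((j for j, t in enumerate(totals) if len(header) + t > max_chars), None)
--     if cut is None:
--         return header + "".join(lines)
--     remaining = len(results) - cut
--     return header + "".join(lines[:cut]) + f"\n[{remaining} more matches not shown due to output size limit]"
-- ===== Notes on version B (the rewrite author's own statement) =====
-- stated objective: alternative
-- what changed: B precomputes all formatted lines and their running character totals, then finds the cutoff index with a single search and joins header + fitting lines (+ note), instead of A's incremental loop that grows the content string and breaks mid-iteration.
import Mathlib
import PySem

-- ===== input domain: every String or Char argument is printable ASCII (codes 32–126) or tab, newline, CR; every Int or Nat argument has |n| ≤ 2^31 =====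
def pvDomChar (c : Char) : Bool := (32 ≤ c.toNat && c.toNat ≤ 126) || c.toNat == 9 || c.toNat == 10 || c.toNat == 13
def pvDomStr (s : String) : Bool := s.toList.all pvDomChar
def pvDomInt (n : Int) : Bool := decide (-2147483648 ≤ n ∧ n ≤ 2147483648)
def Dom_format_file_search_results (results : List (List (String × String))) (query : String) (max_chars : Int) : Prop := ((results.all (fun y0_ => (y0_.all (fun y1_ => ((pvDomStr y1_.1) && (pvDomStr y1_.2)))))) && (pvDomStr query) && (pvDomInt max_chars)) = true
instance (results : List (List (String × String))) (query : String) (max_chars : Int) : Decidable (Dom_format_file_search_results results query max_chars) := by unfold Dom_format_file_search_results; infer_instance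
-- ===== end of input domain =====

-- B precomputes all formatted lines and their running character totals, then finds the cutoff index by a single
-- search and joins the pieces, instead of A's incremental content-growing loop with a mid-iteration break (objective: alternative).


-- ===== PORT A =====
-- shared f-string pieces (used verbatim by both Pythons)
def pvHeader (n : Int) (query : String) : String :=
  "Found " ++ PySem.Int.toStr n ++ " files matching '" ++ query ++ "':\n\n"

def pvLine (i : Int) (r : List (String × String)) : String :=
  PySem.Int.toStr i ++ ". " ++ ((PySem.Dict.mk r).get? "path").getD "" ++ " (Score: "
    ++ ((PySem.Dict.mk r).get? "score").getD "" ++ ")\n"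
-- (getD "" is reached only where Python raises KeyError; Pre_ excludes those inputs)

def pvNote (remaining : Int) : String :=
  "\n[" ++ PySem.Int.toStr remaining ++ " more matches not shown due to output size limit]"

-- A's for-loop over enumerate(results, 1) with the mid-iteration break
def pvLoopA (max_chars n : Int) : List (List (String × String)) → Int → String → String
  | [], _, content => content
  | r :: rest, i, content =>
    let line := pvLine i r
    if PySem.Str.len content + PySem.Str.len line > max_chars then
      content ++ pvNote (n - i + 1)
    else
      pvLoopA max_chars n rest (i + 1) (content ++ line)

def format_file_search_results (results : List (List (String × String))) (query : String) (max_chars : Int) : String :=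
  if results = [] then "No files found matching '" ++ query ++ "'"
  else pvLoopA max_chars (results.length : Int) results 1 (pvHeader (results.length : Int) query)

-- ===== PORT B =====
-- running totals ('running += len(l); totals.append(running)')
def pvAccum (s : Int) : List Int → List Int
  | [] => []
  | x :: xs => (s + x) :: pvAccum (s + x) xs

def format_file_search_results_alt (results : List (List (String × String))) (query : String) (max_chars : Int) : String :=
  if results = [] then "No files found matching '" ++ query ++ "'"
  else
    let header := pvHeader (results.length : Int) query
    let lines := (PySem.List.enumerate results 1).map (fun p => pvLine p.1 p.2)
    let totals := pvAccum 0 (lines.map PySem.Str.len)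
    match totals.findIdx? (fun t => decide (PySem.Str.len header + t > max_chars)) with
    | none => header ++ PySem.Str.join "" lines
    | some j => header ++ PySem.Str.join "" (lines.take j) ++ pvNote ((results.length : Int) - (j : Int))

-- ===== PRECONDITION & SPEC =====
-- Pre_ requires every result dict to carry the keys 'path' and 'score'. This is slightly narrower than A's
-- domain: A never touches results after its truncation break, so it can return even when a later result lacks
-- a key, while B formats all lines up front and raises KeyError there (see claim cites).
def Pre_format_file_search_results (results : List (List (String × String))) (query : String) (max_chars : Int) : Prop :=
  ∀ r ∈ results, ((PySem.Dict.mk r).get? "path").isSome ∧ ((PySem.Dict.mk r).get? "score").isSome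
instance (results : List (List (String × String))) (query : String) (max_chars : Int) : Decidable (Pre_format_file_search_results results query max_chars) := by unfold Pre_format_file_search_results; infer_instance

def pvWitness_format_file_search_results : (List (List (String × String))) × String × Int :=
  ([[("path", "a.py"), ("score", "9")]], "q", 100)

def Spec_format_file_search_results (results : List (List (String × String))) (query : String) (max_chars : Int) (out : String) : Prop := out = format_file_search_results_alt results query max_chars
instance (results : List (List (String × String))) (query : String) (max_chars : Int) (out : String) : Decidable (Spec_format_file_search_results results query max_chars out) := by unfold Spec_format_file_search_results; infer_instance

-- ===== CLAIM (what is proved, stated in full; the proofs are below) =====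
def Claim_equal_format_file_search_results : Prop := ∀ (results : List (List (String × String))) (query : String) (max_chars : Int), Dom_format_file_search_results results query max_chars → Pre_format_file_search_results results query max_chars → Spec_format_file_search_results results query max_chars (format_file_search_results results query max_chars)

-- ===== LEMMAS AND PROOFS =====

theorem pvJoin_nil : PySem.Str.join "" ([] : List String) = "" := rfl

theorem pvJoin_cons (l : String) (ls : List String) :
    PySem.Str.join "" (l :: ls) = l ++ PySem.Str.join "" ls := by
  apply String.toList_inj.mp
  rw [String.toList_append, PySem.Str.toList_join, PySem.Str.toList_join]
  cases ls with
  | nil => simp [PySem.Chars.join, List.intercalate]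
  | cons b t =>
    rw [List.map_cons, List.map_cons, PySem.Chars.join_cons_cons]
    simp

theorem pvAccum_shift (s : Int) (xs : List Int) :
    pvAccum s xs = (pvAccum 0 xs).map (s + ·) := by
  induction xs generalizing s with
  | nil => simp [pvAccum]
  | cons x xs ih =>
    simp only [pvAccum, zero_add]
    rw [ih (s + x), ih x]
    simp only [List.map_cons, List.map_map]
    congr 1
    congr 1
    funext t
    simp [Function.comp, add_assoc]

theorem pvLoopA_eq (max n : Int) (rest : List (List (String × String))) (i : Int) (c : String) :
    pvLoopA max n rest i c =
      (match (pvAccum 0 (((PySem.List.enumerate rest i).map (fun p => pvLine p.1 p.2)).map PySem.Str.len)).findIdx?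
          (fun t => decide (PySem.Str.len c + t > max)) with
       | none => c ++ PySem.Str.join "" ((PySem.List.enumerate rest i).map (fun p => pvLine p.1 p.2))
       | some j => c ++ PySem.Str.join "" (((PySem.List.enumerate rest i).map (fun p => pvLine p.1 p.2)).take j)
                     ++ pvNote (n - i + 1 - (j : Int))) := by
  induction rest generalizing i c with
  | nil => simp [pvLoopA, pvAccum, PySem.List.enumerate_nil, PySem.Str.join, PySem.Chars.join, List.intercalate]
  | cons r rest ih =>
    rw [PySem.List.enumerate_cons]
    simp only [List.map_cons, pvAccum, zero_add, List.findIdx?_cons, decide_eq_true_eq]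
    by_cases h : PySem.Str.len c + PySem.Str.len (pvLine i r) > max
    · rw [if_pos h]
      simp only [pvLoopA]
      rw [if_pos h]
      simp [pvJoin_nil]
    · rw [if_neg h]
      simp only [pvLoopA]
      rw [if_neg h]
      rw [pvAccum_shift, List.findIdx?_map]
      have hpred : ((fun t => decide (PySem.Str.len c + t > max)) ∘ (fun t => PySem.Str.len (pvLine i r) + t))
          = (fun t => decide (PySem.Str.len (c ++ pvLine i r) + t > max)) := by
        funext t
        simp only [Function.comp, PySem.Str.len_append]
        rw [decide_eq_decide]
        omega
      rw [hpred, ih (i + 1) (c ++ pvLine i r)]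
      cases hf : (pvAccum 0 (((PySem.List.enumerate rest (i + 1)).map (fun p => pvLine p.1 p.2)).map PySem.Str.len)).findIdx?
          (fun t => decide (PySem.Str.len (c ++ pvLine i r) + t > max)) with
      | none =>
        simp only [Option.map_none]
        rw [pvJoin_cons, String.append_assoc]
      | some j =>
        simp only [Option.map_some]
        rw [List.take_succ_cons, pvJoin_cons]
        push_cast
        have harg : n - i + 1 - ((j : Int) + 1) = n - (i + 1) + 1 - (j : Int) := by ring
        rw [harg]
        simp only [String.append_assoc]

-- ===== VERDICT (by name: the statement is the Claim_ definition above) =====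
theorem format_file_search_results_spec : Claim_equal_format_file_search_results := by
  intro results query max_chars _ _
  unfold Spec_format_file_search_results
  unfold format_file_search_results format_file_search_results_alt
  by_cases h : results = []
  · simp [h]
  · simp only [if_neg h]
    rw [pvLoopA_eq]
    have harg : ∀ k : Nat, (results.length : Int) - 1 + 1 - (k : Int) = (results.length : Int) - (k : Int) := fun k => by ring
    simp only [harg]
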